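-- pv_equiv track=rewrite | github.com/arpan-svci/BCSE-III-CN-Assignments | Computer_networks_2/main/crc.py | crc_decoding
-- ===== SOURCE A (Python) =====
-- def bitexor(c1,c2):
--     if c1==c2:
--         return '0'
--     else:
--         return '1'
--
-- def xor(s1,s2):
--     s=''
--     for i in range (0,len(s1)):
--         s=s+bitexor(s1[i],s2[i])
--     return s;
--
-- def codewords(datawords,generator):
--     zero=''
--     generator_lenth=len(generator)
--     length=len(datawords)
--     zero='0'*generator_lenth;
--     div=datawords[0:generator_lenth]
--     curser=generator_lenth
--     while curser<=length:
--         if div[0]=='0':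
--             remain=xor(zero,div)
--         else:
--             remain=xor(generator,div)
--         if curser==length:
--             break
--         div=remain[1:generator_lenth]+datawords[curser]
--         curser+=1
--     codeword=datawords[0:length-generator_lenth]+remain
--     return codeword
--
-- def crc_decoding(codeword,length,generator):
--     dataword=''
--     length_code=length+len(generator)
--     i=0
--     while i<len(codeword):
--         if(len(codeword)-i<length_code):
--             code=codeword[i:len(codeword)]
--             dataword+=codewords(code,generator)
--             break
--         code=codeword[i:i+length_code]
--         dataword+=codewords(code,generator)
--         i+=length_code
--     i=0
--     state="correct"
--     while i<len(dataword):
--         if(len(dataword)-i)<length_code: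
--             if(dataword[len(dataword)-len(generator):len(dataword)]!='0'*len(generator)):
--                 state='error'
--             break
--         if dataword[i+length:i+length_code]!='0'*len(generator):
--             state='error'
--             break
--         i=i+length+len(generator)
--     return state
-- ===== SOURCE B (Python) =====
-- def _xor(a, b):
--     return ''.join('0' if x == y else '1' for x, y in zip(a, b))
--
-- def crc_decoding(codeword, length, generator):
--     g = len(generator)
--     zero = '0' * g
--     block_size = length + g
--     i = 0
--     while i < len(codeword):
--         block = codeword[i:i + block_size]
--         rem = block[:g]
--         for ch in block[g:]:
--             rem = _xor(zero if rem[0] == '0' else generator, rem)[1:] + ch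
--         rem = _xor(zero if rem[0] == '0' else generator, rem)
--         if rem != zero:
--             return 'error'
--         i += block_size
--     return 'correct'
-- ===== Notes on version B (the rewrite author's own statement) =====
-- stated objective: faster
-- what changed: B fuses A's two passes into one: instead of building the whole intermediate dataword by repeated string concatenation and then rescanning it for nonzero remainder fields, B computes each block's CRC remainder and tests it immediately, returning 'error' early.
import Mathlib
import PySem

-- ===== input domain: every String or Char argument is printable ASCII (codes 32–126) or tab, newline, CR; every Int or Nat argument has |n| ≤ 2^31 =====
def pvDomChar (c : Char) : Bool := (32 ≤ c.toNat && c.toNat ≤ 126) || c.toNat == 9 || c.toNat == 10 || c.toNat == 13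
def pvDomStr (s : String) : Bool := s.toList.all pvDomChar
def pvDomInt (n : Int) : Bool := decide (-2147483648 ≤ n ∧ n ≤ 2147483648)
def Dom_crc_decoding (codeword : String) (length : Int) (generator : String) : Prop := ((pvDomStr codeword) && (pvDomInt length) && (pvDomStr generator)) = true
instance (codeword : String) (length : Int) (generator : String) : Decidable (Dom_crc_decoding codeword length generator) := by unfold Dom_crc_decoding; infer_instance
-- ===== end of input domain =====

-- B merges A's two passes (build the whole `dataword`, then rescan it) into one pass over the
-- codeword blocks: per block it computes the CRC remainder and checks it at once, returning
-- 'error' early; equivalence is about the return value only (neither program has side effects).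

-- ===== PORT A =====
def pvBitexor (c1 c2 : Char) : Char := if c1 = c2 then '0' else '1'

-- xor: s2[i] would raise IndexError in Python when s2 is shorter than s1; that happens only
-- outside Pre_, so the out-of-range access is rendered with a getD default here.
def pvXorA (s1 s2 : List Char) : List Char :=
  (List.range s1.length).foldl (fun s i => s ++ [pvBitexor (s1.getD i ' ') (s2.getD i ' ')]) []

-- the 'while curser<=length' loop of codewords; returns the final value of 'remain'.
-- Python raises NameError (remain unbound) when the loop body never runs and IndexError on
-- div[0] with empty div; both happen only outside Pre_, so they are rendered by the [] result
-- and a headD default.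
def pvCodewordsLoop (generator zero datawords div : List Char) (curser length fuel : Nat) : List Char :=
  match fuel with
  | 0 => []
  | fuel + 1 =>
    if curser ≤ length then
      let remain := if div.headD ' ' = '0' then pvXorA zero div else pvXorA generator div
      if curser = length then remain
      else pvCodewordsLoop generator zero datawords
             (PySem.List.slice remain (some 1) (some (generator.length : Int)) ++ [datawords.getD curser ' '])
             (curser + 1) length fuel
    else []

def pvCodewordsA (datawords generator : List Char) : List Char :=
  let gl := generator.length
  let length := datawords.length
  let zero := List.replicate gl '0'
  let div := PySem.List.slice datawords (some 0) (some (gl : Int))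
  let remain := pvCodewordsLoop generator zero datawords div gl length (length + 1)
  PySem.List.slice datawords (some 0) (some ((length : Int) - gl)) ++ remain

-- first while loop of crc_decoding (fuel covers every terminating Python run: i advances by lc ≥ 1)
def pvLoop1 (codeword generator : List Char) (lc : Int) (i : Int) (dataword : List Char) (fuel : Nat) : List Char :=
  match fuel with
  | 0 => dataword
  | fuel + 1 =>
    if i < (codeword.length : Int) then
      if (codeword.length : Int) - i < lc then
        dataword ++ pvCodewordsA (PySem.List.slice codeword (some i) (some (codeword.length : Int))) generator
      else
        pvLoop1 codeword generator lc (i + lc)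
          (dataword ++ pvCodewordsA (PySem.List.slice codeword (some i) (some (i + lc))) generator) fuel
    else dataword

-- second while loop of crc_decoding
def pvLoop2 (dataword generator : List Char) (length lc : Int) (i : Int) (fuel : Nat) : String :=
  match fuel with
  | 0 => "correct"
  | fuel + 1 =>
    if i < (dataword.length : Int) then
      if (dataword.length : Int) - i < lc then
        if PySem.List.slice dataword (some ((dataword.length : Int) - generator.length)) (some (dataword.length : Int))
             ≠ List.replicate generator.length '0' then "error" else "correct"
      else if PySem.List.slice dataword (some (i + length)) (some (i + lc)) ≠ List.replicate generator.length '0'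
           then "error"
      else pvLoop2 dataword generator length lc (i + lc) fuel
    else "correct"

def crc_decoding (codeword : String) (length : Int) (generator : String) : String :=
  let cw := codeword.toList
  let gen := generator.toList
  let lc := length + (gen.length : Int)
  let dataword := pvLoop1 cw gen lc 0 [] (cw.length + 1)
  pvLoop2 dataword gen length lc 0 (dataword.length + 1)

-- ===== PORT B =====
def pvXorB (a b : List Char) : List Char := List.zipWith (fun x y => if x = y then '0' else '1') a b

-- one division step: rem[0] would raise IndexError on empty rem in Python, only outside Pre_;
-- rendered with a headD default.
def pvStepB (generator zero rem : List Char) : List Char :=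
  pvXorB (if rem.headD ' ' = '0' then zero else generator) rem

-- the 'for ch in block[g:]' loop followed by the final xor step
def pvRemB (generator zero rem : List Char) (cs : List Char) : List Char :=
  match cs with
  | [] => pvStepB generator zero rem
  | c :: cs => pvRemB generator zero ((pvStepB generator zero rem).drop 1 ++ [c]) cs

-- the 'while i < len(codeword)' loop of B (fuel covers every terminating Python run)
def pvLoopB (codeword generator zero : List Char) (bs : Int) (i : Int) (fuel : Nat) : String :=
  match fuel with
  | 0 => "correct"
  | fuel + 1 =>
    if i < (codeword.length : Int) then
      let block := PySem.List.slice codeword (some i) (some (i + bs))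
      let rem := pvRemB generator zero (block.take generator.length) (block.drop generator.length)
      if rem ≠ zero then "error"
      else pvLoopB codeword generator zero bs (i + bs) fuel
    else "correct"

def crc_decoding_alt (codeword : String) (length : Int) (generator : String) : String :=
  let cw := codeword.toList
  let gen := generator.toList
  let zero := List.replicate gen.length '0'
  let bs := length + (gen.length : Int)
  pvLoopB cw gen zero bs 0 (cw.length + 1)

-- ===== PRECONDITION & SPEC =====
-- Pre_ is exactly where Python A returns normally: on a nonempty codeword A needs a nonempty
-- generator, a nonnegative length and every block (of size length+len(generator), last one
-- possibly shorter) at least as long as the generator, otherwise `codewords` raises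
-- (NameError/IndexError); an empty codeword always returns "correct".
def Pre_crc_decoding (codeword : String) (length : Int) (generator : String) : Prop :=
  codeword.toList = [] ∨
  (1 ≤ generator.toList.length ∧ 0 ≤ length ∧
   (codeword.toList.length % (length.toNat + generator.toList.length) = 0 ∨
    generator.toList.length ≤ codeword.toList.length % (length.toNat + generator.toList.length)))
instance (codeword : String) (length : Int) (generator : String) : Decidable (Pre_crc_decoding codeword length generator) := by unfold Pre_crc_decoding; infer_instance

def pvWitness_crc_decoding : String × Int × String := ("11011010", 5, "101")

def Spec_crc_decoding (codeword : String) (length : Int) (generator : String) (out : String) : Prop := out = crc_decoding_alt codeword length generator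
instance (codeword : String) (length : Int) (generator : String) (out : String) : Decidable (Spec_crc_decoding codeword length generator out) := by unfold Spec_crc_decoding; infer_instance

-- ===== CLAIM (what is proved, stated in full; the proofs are below) =====
def Claim_equal_crc_decoding : Prop := ∀ (codeword : String) (length : Int) (generator : String), Dom_crc_decoding codeword length generator → Pre_crc_decoding codeword length generator → Spec_crc_decoding codeword length generator (crc_decoding codeword length generator)

-- ===== LEMMAS AND PROOFS =====

theorem pvXorA_eq_map (s1 s2 : List Char) :
    pvXorA s1 s2 = (List.range s1.length).map (fun i => pvBitexor (s1.getD i ' ') (s2.getD i ' ')) := by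
  unfold pvXorA
  rw [PySem.List.foldl_append_singleton_eq_map]
  simp

theorem pvXorA_length (s1 s2 : List Char) : (pvXorA s1 s2).length = s1.length := by
  rw [pvXorA_eq_map]; simp

theorem pvXorA_eq_pvXorB (s1 s2 : List Char) (h : s1.length ≤ s2.length) :
    pvXorA s1 s2 = pvXorB s1 s2 := by
  rw [pvXorA_eq_map]
  unfold pvXorB pvBitexor
  induction s1 generalizing s2 with
  | nil => simp
  | cons x xs ih =>
      cases s2 with
      | nil => simp at h
      | cons y ys =>
          simp only [List.length_cons, List.range_succ_eq_map, List.map_cons, List.map_map,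
            List.zipWith_cons_cons, List.getD_cons_zero]
          refine congrArg₂ _ rfl ?_
          simpa using ih ys (by simpa using h)

theorem pvStepB_length (gen zero div : List Char) (hz : zero.length = gen.length)
    (hd : div.length = gen.length) : (pvStepB gen zero div).length = gen.length := by
  unfold pvStepB pvXorB
  split <;> simp [hz, hd]

theorem pvStep_eq (gen zero div : List Char) (hz : zero.length = gen.length)
    (hd : div.length = gen.length) :
    (if div.headD ' ' = '0' then pvXorA zero div else pvXorA gen div) = pvStepB gen zero div := by
  unfold pvStepB
  split <;> rw [pvXorA_eq_pvXorB] <;> simp [hz, hd]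

theorem pvRemB_length (gen zero div cs : List Char) (hg : 1 ≤ gen.length)
    (hz : zero.length = gen.length) (hd : div.length = gen.length) :
    (pvRemB gen zero div cs).length = gen.length := by
  induction cs generalizing div with
  | nil => simpa [pvRemB] using pvStepB_length gen zero div hz hd
  | cons c cs ih =>
      rw [pvRemB]
      exact ih _ (by simp [pvStepB_length gen zero div hz hd]; omega)

theorem pvCodewordsLoop_eq (gen : List Char) (hg : 1 ≤ gen.length) :
    ∀ (n : Nat) (dw div : List Char) (curser f : Nat),
      curser + n = dw.length → div.length = gen.length → n + 1 ≤ f →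
      pvCodewordsLoop gen (List.replicate gen.length '0') dw div curser dw.length f
        = pvRemB gen (List.replicate gen.length '0') div (dw.drop curser) := by
  intro n
  induction n with
  | zero =>
      intro dw div curser f hc hd hf
      obtain ⟨f, rfl⟩ : ∃ f', f = f' + 1 := ⟨f - 1, by omega⟩
      rw [pvCodewordsLoop]
      rw [if_pos (by omega : curser ≤ dw.length), if_pos (by omega : curser = dw.length)]
      rw [List.drop_of_length_le (by omega), pvRemB]
      exact pvStep_eq gen _ div (by simp) hd
  | succ n ih =>
      intro dw div curser f hc hd hf
      obtain ⟨f, rfl⟩ : ∃ f', f = f' + 1 := ⟨f - 1, by omega⟩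
      rw [pvCodewordsLoop]
      simp only []
      rw [if_pos (by omega : curser ≤ dw.length), if_neg (by omega : ¬ curser = dw.length)]
      set zero := List.replicate gen.length '0' with hz
      set remain := (if div.headD ' ' = '0' then pvXorA zero div else pvXorA gen div) with hr
      have hrlen : remain.length = gen.length := by
        rw [hr]; split <;> simp [pvXorA_length, hz]
      have hslice : PySem.List.slice remain (some 1) (some (gen.length : Int)) = remain.drop 1 := by
        rw [PySem.List.slice_toNat remain (by omega) (by omega)]
        simp only [Int.toNat_one, Int.toNat_natCast]
        exact List.take_of_length_le (by simp [hrlen])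
      have hcur : curser < dw.length := by omega
      rw [hslice]
      rw [List.drop_eq_getElem_cons hcur, pvRemB]
      rw [List.getD_eq_getElem dw ' ' hcur]
      rw [show remain = pvStepB gen zero div from pvStep_eq gen zero div (by simp [hz]) hd]
      exact ih dw _ (curser + 1) f (by omega) (by simp [pvStepB_length gen zero div (by simp [hz]) hd]; omega) (by omega)

theorem pvCodewordsA_eq (gen b : List Char) (hg : 1 ≤ gen.length) (hb : gen.length ≤ b.length) :
    pvCodewordsA b gen = b.take (b.length - gen.length)
      ++ pvRemB gen (List.replicate gen.length '0') (b.take gen.length) (b.drop gen.length) := by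
  unfold pvCodewordsA
  simp only []
  have h0 : PySem.List.slice b (some 0) (some (gen.length : Int)) = b.take gen.length := by
    rw [PySem.List.slice_zero_start, PySem.List.slice_to_natCast]
  have h1 : PySem.List.slice b (some 0) (some ((b.length : Int) - gen.length)) = b.take (b.length - gen.length) := by
    rw [show ((b.length : Int) - gen.length) = ((b.length - gen.length : Nat) : Int) by omega]
    rw [PySem.List.slice_zero_start, PySem.List.slice_to_natCast]
  rw [h0, h1]
  congr 1
  rw [show b.drop gen.length = b.drop gen.length from rfl]
  have := pvCodewordsLoop_eq gen hg (b.length - gen.length) b (b.take gen.length) gen.length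
    (b.length + 1) (by omega) (by simp [Nat.min_eq_left hb]) (by omega)
  simpa using this

theorem pvCodewordsA_length (gen b : List Char) (hg : 1 ≤ gen.length) (hb : gen.length ≤ b.length) :
    (pvCodewordsA b gen).length = b.length := by
  rw [pvCodewordsA_eq gen b hg hb]
  have := pvRemB_length gen (List.replicate gen.length '0') (b.take gen.length) (b.drop gen.length)
    hg (by simp) (by simp [Nat.min_eq_left hb])
  simp [this]; omega

-- proof-side reformulation of loop 1: the dataword is the blockwise image of the codeword
def pvD (gen : List Char) (lcN : Nat) (l : List Char) : List Char :=
  if lcN = 0 then [] else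
  if h : l = [] then [] else pvCodewordsA (l.take lcN) gen ++ pvD gen lcN (l.drop lcN)
termination_by l.length
decreasing_by
  simp only [List.length_drop]
  have : l.length ≠ 0 := fun h0 => h (List.eq_nil_of_length_eq_zero h0)
  omega

theorem pvD_drop (gen : List Char) (lcN : Nat) (l : List Char) (h0 : l ≠ []) (hl : 1 ≤ lcN) :
    pvD gen lcN l = pvCodewordsA (l.take lcN) gen ++ pvD gen lcN (l.drop lcN) := by
  have h1 : lcN ≠ 0 := by omega
  rw [pvD]; simp [h0, h1]

theorem pvLoop1_eq (cw gen : List Char) (lcN : Nat) (hl : 1 ≤ lcN) :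
    ∀ (m : Nat) (i f : Nat) (acc : List Char), i + m = cw.length → m + 1 ≤ f →
      pvLoop1 cw gen (lcN : Int) (i : Int) acc f = acc ++ pvD gen lcN (cw.drop i) := by
  intro m
  induction m using Nat.strong_induction_on with
  | _ m ih =>
    intro i f acc hi hf
    obtain ⟨f, rfl⟩ : ∃ f', f = f' + 1 := ⟨f - 1, by omega⟩
    rw [pvLoop1]
    by_cases hm : m = 0
    · subst hm
      rw [if_neg (by omega : ¬ ((i : Int) < (cw.length : Int)))]
      rw [List.drop_of_length_le (by omega), pvD]
      simp
    · rw [if_pos (by omega : (i : Int) < (cw.length : Int))]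
      have hdl : (cw.drop i).length = m := by simp; omega
      have hne : cw.drop i ≠ [] := by
        intro h; rw [h] at hdl; simp at hdl; omega
      by_cases hsh : m < lcN
      · rw [if_pos (by omega : (cw.length : Int) - i < (lcN : Int))]
        have hs : PySem.List.slice cw (some (i : Int)) (some (cw.length : Int)) = cw.drop i := by
          rw [PySem.List.slice_natCast]
          exact List.take_of_length_le (by omega)
        rw [hs, pvD_drop gen lcN _ hne hl]
        rw [List.take_of_length_le (by omega : (cw.drop i).length ≤ lcN)]
        rw [List.drop_eq_nil_of_le (by omega : (cw.drop i).length ≤ lcN), pvD]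
        simp
      · rw [if_neg (by omega : ¬ ((cw.length : Int) - i < (lcN : Int)))]
        rw [show (i : Int) + (lcN : Int) = ((i + lcN : Nat) : Int) by push_cast; omega]
        rw [ih (m - lcN) (by omega) (i + lcN) f _ (by omega) (by omega)]
        rw [pvD_drop gen lcN _ hne hl]
        rw [show PySem.List.slice cw (some (i : Int)) (some ((i + lcN : Nat) : Int))
              = (cw.drop i).take lcN by
          rw [show ((i + lcN : Nat) : Int) = (i : Int) + (lcN : Int) by push_cast; omega]
          exact PySem.List.slice_natCast_add ..]
        rw [List.drop_drop, List.append_assoc]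

theorem pvMain (cw dw gen : List Char) (L : Nat) (hg : 1 ≤ gen.length)
    (hlen : dw.length = cw.length) :
    ∀ (n : Nat) (i : Nat) (f fB : Nat),
      i + n = cw.length →
      dw.drop i = pvD gen (L + gen.length) (cw.drop i) →
      (n % (L + gen.length) = 0 ∨ gen.length ≤ n % (L + gen.length)) →
      n + 1 ≤ f → n + 1 ≤ fB →
      pvLoop2 dw gen (L : Int) ((L + gen.length : Nat) : Int) (i : Int) f
        = pvLoopB cw gen (List.replicate gen.length '0') ((L + gen.length : Nat) : Int) (i : Int) fB := by
  intro n
  induction n using Nat.strong_induction_on with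
  | _ n ih =>
    intro i f fB hi hdrop hmod hf hfB
    obtain ⟨f, rfl⟩ : ∃ f', f = f' + 1 := ⟨f - 1, by omega⟩
    obtain ⟨fB, rfl⟩ : ∃ f', fB = f' + 1 := ⟨fB - 1, by omega⟩
    set lcN := L + gen.length with hlcN
    set zero := List.replicate gen.length '0' with hz
    rw [pvLoop2, pvLoopB]
    simp only []
    by_cases hn : n = 0
    · subst hn
      rw [if_neg (by omega : ¬ ((i : Int) < (dw.length : Int))),
          if_neg (by omega : ¬ ((i : Int) < (cw.length : Int)))]
    · rw [if_pos (by omega : (i : Int) < (dw.length : Int)),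
          if_pos (by omega : (i : Int) < (cw.length : Int))]
      have hdl : (cw.drop i).length = n := by simp; omega
      have hne : cw.drop i ≠ [] := by
        intro h; rw [h] at hdl; simp at hdl; omega
      have hblock : PySem.List.slice cw (some (i : Int)) (some ((i : Int) + (lcN : Int)))
          = (cw.drop i).take lcN := PySem.List.slice_natCast_add ..
      by_cases hsh : n < lcN
      · -- final, possibly shorter block
        have hgn : gen.length ≤ n := by
          rw [Nat.mod_eq_of_lt hsh] at hmod; omega
        have htake : (cw.drop i).take lcN = cw.drop i := List.take_of_length_le (by omega)
        rw [if_pos (by omega : (dw.length : Int) - (i : Int) < ((lcN : Nat) : Int))]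
        rw [hblock, htake]
        set rem := pvRemB gen zero ((cw.drop i).take gen.length) ((cw.drop i).drop gen.length)
          with hrem
        have hDtl : pvD gen lcN (cw.drop i) = pvCodewordsA (cw.drop i) gen := by
          rw [pvD_drop gen lcN _ hne (by omega), htake,
              List.drop_eq_nil_of_le (by omega : (cw.drop i).length ≤ lcN), pvD]
          simp
        have hremlen : rem.length = gen.length :=
          pvRemB_length gen zero _ _ hg (by simp [hz]) (by simp; omega)
        have hcwa : pvCodewordsA (cw.drop i) gen = (cw.drop i).take (n - gen.length) ++ rem := by
          rw [pvCodewordsA_eq gen _ hg (by omega), hdl, hrem, hz]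
        have hslice : PySem.List.slice dw (some ((dw.length : Int) - gen.length))
            (some ((dw.length : Int))) = rem := by
          rw [show ((dw.length : Int) - gen.length) = ((i + (n - gen.length) : Nat) : Int) by
            push_cast; omega]
          rw [show ((dw.length : Int)) = ((i + n : Nat) : Int) by push_cast; omega]
          rw [PySem.List.slice_natCast, show i + n - (i + (n - gen.length)) = gen.length by omega]
          rw [← List.drop_drop, hdrop, hDtl, hcwa]
          rw [List.drop_left' (by simp; omega)]
          exact List.take_of_length_le (by omega)
        rw [hslice]
        by_cases hr : rem = zero
        · rw [if_neg (by simp [hr, hz]), if_neg (by simp [hr])]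
          obtain ⟨fB, rfl⟩ : ∃ f', fB = f' + 1 := ⟨fB - 1, by omega⟩
          rw [pvLoopB]
          rw [if_neg (by omega : ¬ ((i : Int) + ((lcN : Nat) : Int) < (cw.length : Int)))]
        · rw [if_pos (by rw [← hz]; exact hr : rem ≠ List.replicate gen.length '0'), if_pos hr]
      · -- full block
        rw [if_neg (by omega : ¬ ((dw.length : Int) - (i : Int) < ((lcN : Nat) : Int)))]
        rw [hblock]
        set blk := (cw.drop i).take lcN with hblk
        have hbl : blk.length = lcN := by rw [hblk]; simp; omega
        set rem := pvRemB gen zero (blk.take gen.length) (blk.drop gen.length) with hrem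
        have hremlen : rem.length = gen.length :=
          pvRemB_length gen zero _ _ hg (by simp [hz]) (by rw [List.length_take, hbl]; omega)
        have hcwa : pvCodewordsA blk gen = blk.take L ++ rem := by
          rw [pvCodewordsA_eq gen _ hg (by omega), hbl, hrem, hz]
          congr 2
          omega
        have hDtl : pvD gen lcN (cw.drop i)
            = (blk.take L ++ rem) ++ pvD gen lcN (cw.drop (i + lcN)) := by
          rw [pvD_drop gen lcN _ hne (by omega), ← hblk, hcwa, List.drop_drop]
        have hslice : PySem.List.slice dw (some ((i : Int) + (L : Int)))
            (some ((i : Int) + ((lcN : Nat) : Int))) = rem := by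
          rw [show ((i : Int) + (L : Int)) = ((i + L : Nat) : Int) by push_cast; omega]
          rw [show ((i : Int) + ((lcN : Nat) : Int)) = ((i + lcN : Nat) : Int) by push_cast; omega]
          rw [PySem.List.slice_natCast, show i + lcN - (i + L) = gen.length by omega]
          rw [← List.drop_drop, hdrop, hDtl, List.append_assoc]
          rw [List.drop_left' (by rw [List.length_take, hbl]; omega)]
          exact List.take_left' hremlen
        rw [hslice]
        by_cases hr : rem = zero
        · rw [if_neg (by simp [hr, hz]), if_neg (by simp [hr])]
          have hdrop' : dw.drop (i + lcN) = pvD gen lcN (cw.drop (i + lcN)) := by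
            rw [← List.drop_drop, hdrop, hDtl]
            rw [List.drop_left' (by simp [hbl]; omega)]
          have hmod' : (n - lcN) % lcN = 0 ∨ gen.length ≤ (n - lcN) % lcN := by
            have he : (n - lcN) % lcN = n % lcN := by
              conv_rhs => rw [show n = (n - lcN) + lcN by omega]
              rw [Nat.add_mod_right]
            rw [he]; exact hmod
          have := ih (n - lcN) (by omega) (i + lcN) f fB (by omega) hdrop' hmod'
            (by omega) (by omega)
          rw [show ((i : Int) + ((lcN : Nat) : Int)) = ((i + lcN : Nat) : Int) by push_cast; omega]
          exact this
        · rw [if_pos (by rw [← hz]; exact hr : rem ≠ List.replicate gen.length '0'), if_pos hr]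

theorem pvD_length (gen : List Char) (lcN : Nat) (hg : 1 ≤ gen.length) (hlc : gen.length ≤ lcN) :
    ∀ (n : Nat) (l : List Char), l.length = n →
      (l.length % lcN = 0 ∨ gen.length ≤ l.length % lcN) →
      (pvD gen lcN l).length = l.length := by
  intro n
  induction n using Nat.strong_induction_on with
  | _ n ih =>
    intro l hl hmod
    by_cases h0 : l = []
    · subst h0; rw [pvD]; simp
    · have hlen0 : l.length ≠ 0 := fun h => h0 (List.eq_nil_of_length_eq_zero h)
      rw [pvD_drop gen lcN l h0 (by omega)]
      by_cases hsh : l.length < lcN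
      · rw [List.take_of_length_le (by omega), List.drop_eq_nil_of_le (by omega), pvD]
        have hgl : gen.length ≤ l.length := by
          rw [Nat.mod_eq_of_lt hsh] at hmod; omega
        simp [pvCodewordsA_length gen l hg hgl]
      · have hbl : (l.take lcN).length = lcN := by simp; omega
        have hca : (pvCodewordsA (l.take lcN) gen).length = lcN := by
          rw [pvCodewordsA_length gen _ hg (by omega), hbl]
        have hmod' : (l.drop lcN).length % lcN = 0 ∨ gen.length ≤ (l.drop lcN).length % lcN := by
          have he : (l.length - lcN) % lcN = l.length % lcN := by
            conv_rhs => rw [show l.length = (l.length - lcN) + lcN by omega]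
            rw [Nat.add_mod_right]
          simp only [List.length_drop, he]
          exact hmod
        have := ih (l.drop lcN).length (by simp; omega) (l.drop lcN) rfl hmod'
        simp only [List.length_append, hca, this, List.length_drop]
        omega

-- ===== VERDICT (by name: the statement is the Claim_ definition above) =====
theorem crc_decoding_spec : Claim_equal_crc_decoding := by
  unfold Claim_equal_crc_decoding
  intro codeword length generator _ hpre
  unfold Spec_crc_decoding crc_decoding crc_decoding_alt
  simp only []
  rcases hpre with hnil | ⟨hg, hL, hmod⟩
  · rw [hnil]
    simp [pvLoop1, pvLoop2, pvLoopB]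
  · set cw := codeword.toList with hcw
    set gen := generator.toList with hgen
    set L := length.toNat with hLdef
    have hlc : length + (gen.length : Int) = ((L + gen.length : Nat) : Int) := by
      push_cast; omega
    have hlen : length = (L : Int) := by omega
    rw [hlc, hlen]
    have hdw : pvLoop1 cw gen ((L + gen.length : Nat) : Int) 0 [] (cw.length + 1)
        = pvD gen (L + gen.length) cw := by
      have := pvLoop1_eq cw gen (L + gen.length) (by omega) cw.length 0 (cw.length + 1) []
        (by omega) (by omega)
      simpa using this
    rw [hdw]
    have hdlen : (pvD gen (L + gen.length) cw).length = cw.length :=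
      pvD_length gen (L + gen.length) hg (by omega) cw.length cw rfl hmod
    have := pvMain cw (pvD gen (L + gen.length) cw) gen L hg hdlen cw.length 0
      ((pvD gen (L + gen.length) cw).length + 1) (cw.length + 1) (by omega) (by simp)
      hmod (by omega) (by omega)
    simpa using this
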